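-- pv_equiv track=rewrite | github.com/christophermoverton/stratlake-trade-engine | src/research/visualization/artifacts.py | _normalize_metric_name
-- ===== SOURCE A (Python) =====
-- def _normalize_metric_name(metric_name: str | None) -> str:
--     if metric_name is None:
--         raise ValueError("metric_name is required for metric-qualified plot artifacts.")
--
--     normalized = "".join(
--         character.lower() if character.isalnum() else "_"
--         for character in metric_name.strip()
--     ).strip("_")
--     while "__" in normalized:
--         normalized = normalized.replace("__", "_")
--     if not normalized:
--         raise ValueError("metric_name must contain at least one alphanumeric character.")
--     return normalized
-- ===== SOURCE B (Python) =====
-- def _normalize_metric_name(metric_name):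
--     if metric_name is None:
--         raise ValueError("metric_name is required for metric-qualified plot artifacts.")
--
--     parts = []
--     current = []
--     for character in metric_name:
--         if character.isalnum():
--             current.append(character.lower())
--         elif current:
--             parts.append("".join(current))
--             current = []
--     if current:
--         parts.append("".join(current))
--     if not parts:
--         raise ValueError("metric_name must contain at least one alphanumeric character.")
--     return "_".join(parts)
-- ===== Notes on version B (the rewrite author's own statement) =====
-- stated objective: alternative
-- what changed: One pass that accumulates maximal alphanumeric runs and joins them with '_', replacing A's map-then-strip pipeline with its repeated whole-string replace('__','_') loop.
import Mathlib
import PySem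

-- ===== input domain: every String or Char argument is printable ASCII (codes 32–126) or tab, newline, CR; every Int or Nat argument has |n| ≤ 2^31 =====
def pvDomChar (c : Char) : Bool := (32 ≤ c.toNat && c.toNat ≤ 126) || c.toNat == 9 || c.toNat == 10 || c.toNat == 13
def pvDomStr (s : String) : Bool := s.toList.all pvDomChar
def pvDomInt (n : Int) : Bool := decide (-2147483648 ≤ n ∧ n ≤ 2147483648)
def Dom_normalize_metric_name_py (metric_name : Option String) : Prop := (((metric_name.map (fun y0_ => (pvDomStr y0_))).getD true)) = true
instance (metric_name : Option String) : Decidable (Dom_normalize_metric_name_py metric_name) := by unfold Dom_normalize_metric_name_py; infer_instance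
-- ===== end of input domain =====

-- B replaces A's map/strip/replace-loop pipeline by a single pass that collects the maximal
-- alphanumeric runs and joins them with '_' (no repeated whole-string replace scans).

-- ===== PORT A =====
def pvNormChar (c : Char) : Char :=
  if PySem.Chars.isalnum c then PySem.Chars.lowerChar c else '_'

-- `while "__" in normalized: normalized = normalized.replace("__", "_")`.
-- Fuel = the string's length; the proof shows it is never exhausted (each pass with "__" present shortens the string).
def pvAWhile : Nat → List Char → List Char
  | 0, l => l
  | fuel+1, l =>
    if PySem.Chars.isIn ['_', '_'] l then pvAWhile fuel (PySem.Chars.replace l ['_', '_'] ['_'])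
    else l

def normalize_metric_name_py (metric_name : Option String) : String :=
  match metric_name with
  | none => ""  -- Python raises ValueError here (excluded by Pre_)
  | some s =>
    let normalized := PySem.Chars.stripChars ((PySem.Chars.strip s.toList).map pvNormChar) ['_']
    let collapsed := pvAWhile normalized.length normalized
    if collapsed = [] then ""  -- Python raises ValueError here (excluded by Pre_)
    else String.ofList collapsed

-- ===== PORT B =====
def pvBStep (st : List (List Char) × List Char) (character : Char) : List (List Char) × List Char :=
  if PySem.Chars.isalnum character then (st.1, st.2 ++ [PySem.Chars.lowerChar character])
  else if st.2 = [] then st else (st.1 ++ [st.2], [])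

def normalize_metric_name_py_alt (metric_name : Option String) : String :=
  match metric_name with
  | none => ""  -- Python raises ValueError here (excluded by Pre_)
  | some s =>
    let st := s.toList.foldl pvBStep ([], [])
    let parts := if st.2 = [] then st.1 else st.1 ++ [st.2]
    if parts = [] then ""  -- Python raises ValueError here (excluded by Pre_)
    else String.ofList (PySem.Chars.join ['_'] parts)

-- ===== PRECONDITION & SPEC =====
-- Pre_ excludes exactly the inputs on which A raises ValueError: None, and strings
-- containing no alphanumeric character (then `normalized` is empty and A raises).
def Pre_normalize_metric_name_py (metric_name : Option String) : Prop :=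
  ((metric_name.map (fun s => s.toList.any PySem.Chars.isalnum)).getD false) = true
instance (metric_name : Option String) : Decidable (Pre_normalize_metric_name_py metric_name) := by
  unfold Pre_normalize_metric_name_py; infer_instance

def pvWitness_normalize_metric_name_py : Option String := some "Sharpe Ratio (30d)"

def Spec_normalize_metric_name_py (metric_name : Option String) (out : String) : Prop :=
  out = normalize_metric_name_py_alt metric_name
instance (metric_name : Option String) (out : String) : Decidable (Spec_normalize_metric_name_py metric_name out) := by
  unfold Spec_normalize_metric_name_py; infer_instance

-- ===== CLAIM (what is proved, stated in full; the proofs are below) =====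
def Claim_equal_normalize_metric_name_py : Prop := ∀ (metric_name : Option String), Dom_normalize_metric_name_py metric_name → Pre_normalize_metric_name_py metric_name → Spec_normalize_metric_name_py metric_name (normalize_metric_name_py metric_name)

-- ===== LEMMAS AND PROOFS =====

-- ---- character facts ----
lemma pv_ofNat_toNat (n : Nat) (h1 : 97 ≤ n) (h2 : n ≤ 122) : (Char.ofNat n).toNat = n := by
  unfold Char.ofNat
  rw [dif_pos (by left; omega)]
  rfl

lemma pv_alnum_bounds (c : Char) (h : PySem.Chars.isalnum c = true) :
    (48 ≤ c.toNat ∧ c.toNat ≤ 57) ∨ (65 ≤ c.toNat ∧ c.toNat ≤ 90) ∨ (97 ≤ c.toNat ∧ c.toNat ≤ 122) := by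
  simp [PySem.Chars.isalnum, PySem.Chars.isalpha, PySem.Chars.isdigit, PySem.Chars.isupper,
        PySem.Chars.islower, Char.le_def, UInt32.le_iff_toNat_le] at h
  omega

lemma pv_space_not_alnum (c : Char) (h : PySem.Chars.isspace c = true) : PySem.Chars.isalnum c = false := by
  simp [PySem.Chars.isspace] at h
  simp [PySem.Chars.isalnum, PySem.Chars.isalpha, PySem.Chars.isdigit, PySem.Chars.isupper,
        PySem.Chars.islower, Char.le_def, UInt32.le_iff_toNat_le]
  omega

lemma pv_lower_ne (c : Char) (h : PySem.Chars.isalnum c = true) : PySem.Chars.lowerChar c ≠ '_' := by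
  intro he
  have h95 := congrArg Char.toNat he
  unfold PySem.Chars.lowerChar at h95
  rcases pv_alnum_bounds c h with hb | hb | hb
  · have hup : PySem.Chars.isupper c = false := by
      simp [PySem.Chars.isupper, Char.le_def, UInt32.le_iff_toNat_le]; omega
    rw [hup] at h95; simp at h95; omega
  · have hup : PySem.Chars.isupper c = true := by
      simp [PySem.Chars.isupper, Char.le_def, UInt32.le_iff_toNat_le]; omega
    rw [hup] at h95
    simp at h95
    rw [pv_ofNat_toNat (c.toNat + 32) (by omega) (by omega)] at h95
    omega
  · have hup : PySem.Chars.isupper c = false := by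
      simp [PySem.Chars.isupper, Char.le_def, UInt32.le_iff_toNat_le]; omega
    rw [hup] at h95; simp at h95; omega

lemma pv_normChar_underscore (c : Char) (h : PySem.Chars.isalnum c = false) : pvNormChar c = '_' := by
  simp [pvNormChar, h]

-- ---- pvR: one pass of normalized.replace("__", "_") ----
def pvR : List Char → List Char
  | [] => []
  | [c] => [c]
  | a :: b :: t => if a = '_' ∧ b = '_' then '_' :: pvR t else a :: pvR (b :: t)

lemma pvR_dd (t : List Char) : pvR ('_' :: '_' :: t) = '_' :: pvR t := by
  simp [pvR]

lemma pvR_ndd (a b : Char) (t : List Char) (h : ¬(a = '_' ∧ b = '_')) :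
    pvR (a :: b :: t) = a :: pvR (b :: t) := by
  simp only [pvR]; rw [if_neg h]

lemma pv_go_eq (fuel : Nat) : ∀ (l acc : List Char), l.length ≤ fuel →
    PySem.Chars.replace.go ['_', '_'] ['_'] fuel l acc = acc.reverse ++ pvR l := by
  induction fuel with
  | zero =>
    intro l acc hl
    have : l = [] := by cases l <;> simp_all
    subst this
    simp [PySem.Chars.replace.go, pvR]
  | succ fuel ih =>
    intro l acc hl
    match l with
    | [] => simp [PySem.Chars.replace.go, pvR]
    | [c] =>
      simp only [PySem.Chars.replace.go, List.isPrefixOf, Bool.and_false, Bool.false_eq_true,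
        if_false]
      rw [ih [] (c :: acc) (by simp)]
      simp [pvR]
    | a :: b :: t =>
      simp only [List.length_cons] at hl
      by_cases hab : a = '_' ∧ b = '_'
      · obtain ⟨ha, hb⟩ := hab
        subst ha; subst hb
        simp only [PySem.Chars.replace.go]
        rw [if_pos (by simp [List.isPrefixOf])]
        rw [show List.drop (['_', '_'] : List Char).length ('_' :: '_' :: t) = t from rfl,
            show (['_'] : List Char).reverse ++ acc = '_' :: acc from rfl]
        rw [ih t ('_' :: acc) (by omega)]
        simp [pvR_dd]
      · have hneg : ¬((['_', '_'] : List Char).isPrefixOf (a :: b :: t) = true) := by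
          simp only [List.isPrefixOf, Bool.and_true, Bool.and_eq_true, beq_iff_eq]
          rintro ⟨h1, h2⟩
          exact hab ⟨h1.symm, h2.symm⟩
        simp only [PySem.Chars.replace.go]
        rw [if_neg hneg]
        rw [ih (b :: t) (a :: acc) (by simp only [List.length_cons]; omega)]
        rw [pvR_ndd a b t hab]
        simp

lemma pv_replace_eq (l : List Char) : PySem.Chars.replace l ['_', '_'] ['_'] = pvR l := by
  unfold PySem.Chars.replace
  simp only [List.isEmpty_cons, Bool.false_eq_true, if_false]
  exact pv_go_eq l.length l [] le_rfl

lemma pvR_length_le (l : List Char) : (pvR l).length ≤ l.length := by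
  induction l using pvR.induct with
  | case1 => simp [pvR]
  | case2 c => simp [pvR]
  | case3 a b t h ih =>
    obtain ⟨ha, hb⟩ := h; subst ha; subst hb
    rw [pvR_dd]
    simp only [List.length_cons]
    omega
  | case4 a b t h ih =>
    rw [pvR_ndd a b t h]
    simp only [List.length_cons] at ih ⊢
    omega

lemma pvR_length_lt (l : List Char) (h : ['_', '_'] <:+: l) : (pvR l).length < l.length := by
  induction l using pvR.induct with
  | case1 => have := h.length_le; simp at this
  | case2 c => have := h.length_le; simp at this
  | case3 a b t hab ih =>
    obtain ⟨ha, hb⟩ := hab; subst ha; subst hb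
    rw [pvR_dd]
    have := pvR_length_le t
    simp only [List.length_cons]
    omega
  | case4 a b t hab ih =>
    rw [pvR_ndd a b t hab]
    have hbt : ['_', '_'] <:+: b :: t := by
      rcases List.infix_cons_iff.mp h with hp | hi
      · rcases List.cons_prefix_cons.mp hp with ⟨ha, hp2⟩
        rcases List.cons_prefix_cons.mp hp2 with ⟨hb, _⟩
        exact absurd ⟨ha.symm, hb.symm⟩ hab
      · exact hi
    have := ih hbt
    simp only [List.length_cons] at this ⊢
    omega

lemma pvR_head? (l : List Char) : (pvR l).head? = l.head? := by
  induction l using pvR.induct with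
  | case1 => simp [pvR]
  | case2 c => simp [pvR]
  | case3 a b t h ih =>
    obtain ⟨ha, hb⟩ := h; subst ha; subst hb
    rw [pvR_dd]; simp
  | case4 a b t h ih =>
    rw [pvR_ndd a b t h]; simp

-- ---- pvCU: collapse consecutive '_' runs ----
def pvCU : List Char → List Char
  | [] => []
  | [c] => [c]
  | a :: b :: t => if a = '_' ∧ b = '_' then pvCU (b :: t) else a :: pvCU (b :: t)

lemma pvCU_dd (t : List Char) : pvCU ('_' :: '_' :: t) = pvCU ('_' :: t) := by
  simp [pvCU]

lemma pvCU_cons_ne (c : Char) (x : List Char) (h : c ≠ '_') : pvCU (c :: x) = c :: pvCU x := by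
  cases x with
  | nil => simp [pvCU]
  | cons y t => simp only [pvCU]; rw [if_neg (by intro hh; exact h hh.1)]

lemma pvCU_underscore (x : List Char) :
    pvCU ('_' :: x) = if x.head? = some '_' then pvCU x else '_' :: pvCU x := by
  cases x with
  | nil => simp [pvCU]
  | cons y t =>
    by_cases hy : y = '_'
    · subst hy; simp [pvCU]
    · simp only [pvCU, List.head?_cons]
      rw [if_neg (by intro hh; exact hy hh.2), if_neg (by simp [hy])]

lemma pvCU_pvR (l : List Char) : pvCU (pvR l) = pvCU l := by
  induction l using pvR.induct with
  | case1 => simp [pvR]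
  | case2 c => simp [pvR]
  | case3 a b t h ih =>
    obtain ⟨ha, hb⟩ := h; subst ha; subst hb
    rw [pvR_dd, pvCU_dd, pvCU_underscore (pvR t), pvR_head? t, ih, ← pvCU_underscore t]
  | case4 a b t h ih =>
    rw [pvR_ndd a b t h]
    by_cases ha : a = '_'
    · subst ha
      have hb : b ≠ '_' := by intro hb; exact h ⟨rfl, hb⟩
      rw [pvCU_underscore (pvR (b :: t)), pvR_head? (b :: t)]
      simp only [List.head?_cons]
      rw [if_neg (by simp [hb]), ih, pvCU_underscore (b :: t)]
      simp only [List.head?_cons]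
      rw [if_neg (by simp [hb])]
    · rw [pvCU_cons_ne a _ ha, pvCU_cons_ne a _ ha, ih]

lemma pvCU_no_dd (l : List Char) (h : ¬ (['_', '_'] <:+: l)) : pvCU l = l := by
  induction l using pvCU.induct with
  | case1 => simp [pvCU]
  | case2 c => simp [pvCU]
  | case3 a b t hab ih =>
    exfalso
    obtain ⟨ha, hb⟩ := hab; subst ha; subst hb
    exact h (List.infix_cons_iff.mpr (Or.inl
      (List.cons_prefix_cons.mpr ⟨rfl, List.cons_prefix_cons.mpr ⟨rfl, List.nil_prefix⟩⟩)))
  | case4 a b t hab ih =>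
    simp only [pvCU]
    rw [if_neg hab, ih (fun hi => h (List.infix_cons_iff.mpr (Or.inr hi)))]

lemma pvAWhile_eq (fuel : Nat) : ∀ l : List Char, l.length ≤ fuel → pvAWhile fuel l = pvCU l := by
  induction fuel with
  | zero =>
    intro l hl
    have : l = [] := by cases l <;> simp_all
    subst this; simp [pvAWhile, pvCU]
  | succ fuel ih =>
    intro l hl
    simp only [pvAWhile]
    by_cases hin : PySem.Chars.isIn ['_', '_'] l = true
    · rw [if_pos hin, pv_replace_eq]
      have hinf := (PySem.Chars.isIn_iff_infix _ _).mp hin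
      have hlt := pvR_length_lt l hinf
      rw [ih (pvR l) (by omega), pvCU_pvR]
    · rw [if_neg hin]
      exact (pvCU_no_dd l ((PySem.Chars.isIn_eq_false_iff _ _).mp (by simpa using hin))).symm

lemma pvCU_underscore_drop (m : List Char) :
    pvCU ('_' :: m) = '_' :: pvCU (m.dropWhile (· == '_')) := by
  induction m with
  | nil => simp [pvCU]
  | cons y t ih =>
    by_cases hy : y = '_'
    · subst hy
      rw [pvCU_dd, ih]
      simp
    · rw [pvCU_underscore]
      simp only [List.head?_cons]
      rw [if_neg (by simp [hy])]
      rw [List.dropWhile_cons_of_neg (by simp [hy])]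

-- ---- pvTok: the maximal-run tokenizer (B's loop, seen over the mapped characters) ----
def pvTok : List Char → List Char → List (List Char)
  | cur, [] => if cur = [] then [] else [cur]
  | cur, x :: m =>
    if x = '_' then
      (if cur = [] then pvTok [] m else cur :: pvTok [] m)
    else pvTok (cur ++ [x]) m

lemma pvTok_under (cur : List Char) (m : List Char) :
    pvTok cur ('_' :: m) = if cur = [] then pvTok [] m else cur :: pvTok [] m := by
  simp [pvTok]

lemma pvTok_other (cur : List Char) (x : Char) (m : List Char) (h : x ≠ '_') :
    pvTok cur (x :: m) = pvTok (cur ++ [x]) m := by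
  simp [pvTok, h]

lemma pv_fold (l : List Char) : ∀ (ps : List (List Char)) (cur : List Char),
    (let st := l.foldl pvBStep (ps, cur);
     if st.2 = [] then st.1 else st.1 ++ [st.2]) = ps ++ pvTok cur (l.map pvNormChar) := by
  induction l with
  | nil =>
    intro ps cur
    simp only [List.foldl_nil, List.map_nil, pvTok]
    by_cases h : cur = [] <;> simp [h]
  | cons c t ih =>
    intro ps cur
    simp only [List.foldl_cons, List.map_cons]
    by_cases hc : PySem.Chars.isalnum c = true
    · rw [show pvBStep (ps, cur) c = (ps, cur ++ [PySem.Chars.lowerChar c]) by simp [pvBStep, hc]]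
      rw [ih]
      simp only [pvNormChar, if_pos hc]
      rw [pvTok_other cur _ _ (pv_lower_ne c hc)]
    · have hc' : PySem.Chars.isalnum c = false := by simpa using hc
      rw [pv_normChar_underscore c hc', pvTok_under]
      by_cases hcur : cur = []
      · subst hcur
        rw [show pvBStep (ps, []) c = (ps, []) by simp [pvBStep, hc']]
        rw [ih]; simp
      · rw [show pvBStep (ps, cur) c = (ps ++ [cur], []) by simp [pvBStep, hc', hcur]]
        rw [ih]
        simp [hcur]

lemma pvTok_ne_nil (m : List Char) : ∀ cur : List Char,
    (cur ≠ [] ∨ ∃ c ∈ m, c ≠ '_') → pvTok cur m ≠ [] := by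
  induction m with
  | nil =>
    intro cur h
    rcases h with h | ⟨c, hc, _⟩
    · simp [pvTok, h]
    · simp at hc
  | cons x t ih =>
    intro cur h
    by_cases hx : x = '_'
    · subst hx
      rw [pvTok_under]
      by_cases hcur : cur = []
      · subst hcur
        rw [if_pos rfl]
        apply ih
        rcases h with h | ⟨c, hc, hne⟩
        · exact absurd rfl h
        · rcases List.mem_cons.mp hc with rfl | hc
          · exact absurd rfl hne
          · exact Or.inr ⟨c, hc, hne⟩
      · rw [if_neg hcur]; simp
    · rw [pvTok_other cur x t hx]
      exact ih _ (Or.inl (by simp))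

lemma pv_exists_ne : ∀ (m : List Char), m ≠ [] → m.getLast? ≠ some '_' → ∃ c ∈ m, c ≠ '_' := by
  intro m
  induction m with
  | nil => intro h _; exact absurd rfl h
  | cons y t ih =>
    intro _ hlast
    cases t with
    | nil =>
      refine ⟨y, by simp, ?_⟩
      intro hy; subst hy; simp at hlast
    | cons z t2 =>
      have h' : (z :: t2).getLast? ≠ some '_' := by rwa [List.getLast?_cons_cons] at hlast
      obtain ⟨c, hc, hcne⟩ := ih (by simp) h'
      exact ⟨c, by simp [hc], hcne⟩

lemma pvM (n : Nat) : ∀ (m cur : List Char), m.length ≤ n → ('_' ∉ cur) →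
    m.getLast? ≠ some '_' →
    PySem.Chars.join ['_'] (pvTok cur m) =
      if cur = [] then pvCU (m.dropWhile (· == '_')) else cur ++ pvCU m := by
  induction n with
  | zero =>
    intro m cur hl hcur hlast
    have : m = [] := by cases m <;> simp_all
    subst this
    simp only [pvTok]
    by_cases h : cur = []
    · simp [h, PySem.Chars.join_nil, pvCU]
    · simp [h, PySem.Chars.join_singleton, pvCU]
  | succ n ih =>
    intro m cur hl hcur hlast
    match m with
    | [] =>
      simp only [pvTok]
      by_cases h : cur = []
      · simp [h, PySem.Chars.join_nil, pvCU]
      · simp [h, PySem.Chars.join_singleton, pvCU]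
    | x :: m' =>
      simp only [List.length_cons] at hl
      by_cases hx : x = '_'
      · subst hx
        have hm'ne : m' ≠ [] := by intro hh; subst hh; simp at hlast
        have hlast' : m'.getLast? ≠ some '_' := by
          cases m' with
          | nil => simp
          | cons y t => rwa [List.getLast?_cons_cons] at hlast
        have hrec := ih m' [] (by omega) (by simp) hlast'
        rw [if_pos rfl] at hrec
        rw [pvTok_under]
        by_cases hcur2 : cur = []
        · subst hcur2
          rw [if_pos rfl, if_pos rfl, hrec]
          rw [List.dropWhile_cons_of_pos (by simp)]
        · rw [if_neg hcur2, if_neg hcur2]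
          have hTne : pvTok [] m' ≠ [] := pvTok_ne_nil m' [] (Or.inr (pv_exists_ne m' hm'ne hlast'))
          obtain ⟨b, bt, hT⟩ : ∃ b bt, pvTok [] m' = b :: bt := by
            cases hTT : pvTok [] m' with
            | nil => exact absurd hTT hTne
            | cons b bt => exact ⟨b, bt, rfl⟩
          rw [hT, PySem.Chars.join_cons_cons, ← hT, hrec, pvCU_underscore_drop]
          simp
      · rw [pvTok_other cur x m' hx]
        have hlast' : m'.getLast? ≠ some '_' := by
          cases m' with
          | nil => simp
          | cons y t => rwa [List.getLast?_cons_cons] at hlast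
        have hrec := ih m' (cur ++ [x]) (by omega)
          (by intro hmem
              rcases List.mem_append.mp hmem with h1 | h1
              · exact hcur h1
              · simp at h1; exact hx h1.symm) hlast'
        rw [if_neg (by simp)] at hrec
        rw [hrec]
        by_cases hc : cur = []
        · subst hc
          rw [if_pos rfl, List.dropWhile_cons_of_neg (by simp [hx]), pvCU_cons_ne x m' hx]
          simp
        · rw [if_neg hc, pvCU_cons_ne x m' hx]
          simp

-- ---- dropWhile / padding helpers ----
lemma pv_dropWhile_all {p : Char → Bool} (u : List Char) (w : List Char)
    (h : ∀ c ∈ u, p c = true) : List.dropWhile p (u ++ w) = List.dropWhile p w := by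
  induction u with
  | nil => simp
  | cons c t ih =>
    rw [List.cons_append, List.dropWhile_cons_of_pos (h c (by simp))]
    exact ih (fun c hc => h c (by simp [hc]))

lemma pv_strip_pad (u z v : List Char) (hu : ∀ c ∈ u, c = '_') (hv : ∀ c ∈ v, c = '_') :
    (List.dropWhile (fun c : Char => c == '_')
       (List.dropWhile (fun c : Char => c == '_') (u ++ z ++ v)).reverse).reverse
    = (List.dropWhile (fun c : Char => c == '_')
       (List.dropWhile (fun c : Char => c == '_') z).reverse).reverse := by
  rw [List.append_assoc, pv_dropWhile_all u _ (fun c hc => by simp [hu c hc])]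
  rw [List.dropWhile_append]
  by_cases hz : (List.dropWhile (fun c : Char => c == '_') z).isEmpty = true
  · rw [if_pos hz]
    rw [show List.dropWhile (fun c : Char => c == '_') v = [] from
      List.dropWhile_eq_nil_iff.mpr (fun c hc => by simp [hv c hc])]
    simp only [List.isEmpty_iff] at hz
    rw [hz]
  · rw [if_neg hz, List.reverse_append,
      pv_dropWhile_all v.reverse _ (fun c hc => by simp [hv c (List.mem_reverse.mp hc)])]

lemma pv_decomp (l : List Char) : ∃ u v, l = u ++ PySem.Chars.strip l ++ v ∧
    (∀ c ∈ u, PySem.Chars.isspace c = true) ∧ (∀ c ∈ v, PySem.Chars.isspace c = true) := by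
  refine ⟨List.takeWhile PySem.Chars.isspace l,
    (List.takeWhile PySem.Chars.isspace (List.dropWhile PySem.Chars.isspace l).reverse).reverse,
    ?_, fun c hc => List.mem_takeWhile_imp hc,
    fun c hc => List.mem_takeWhile_imp (List.mem_reverse.mp hc)⟩
  have hs : PySem.Chars.strip l =
      (List.dropWhile PySem.Chars.isspace (List.dropWhile PySem.Chars.isspace l).reverse).reverse := rfl
  have h3 := congrArg List.reverse
    (List.takeWhile_append_dropWhile (p := PySem.Chars.isspace)
      (l := (List.dropWhile PySem.Chars.isspace l).reverse)).symm
  simp only [List.reverse_reverse, List.reverse_append] at h3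
  conv_lhs => rw [← List.takeWhile_append_dropWhile (p := PySem.Chars.isspace) (l := l), h3]
  rw [hs, List.append_assoc]

lemma pvTok_dropWhile (m : List Char) : pvTok [] m = pvTok [] (m.dropWhile (· == '_')) := by
  induction m with
  | nil => simp
  | cons x t ih =>
    by_cases hx : x = '_'
    · subst hx
      rw [List.dropWhile_cons_of_pos (by simp), pvTok_under, if_pos rfl]
      exact ih
    · rw [List.dropWhile_cons_of_neg (by simp [hx])]

lemma pvTok_all_underscore (v : List Char) (hv : ∀ c ∈ v, c = '_') : ∀ cur : List Char,
    pvTok cur v = if cur = [] then [] else [cur] := by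
  induction v with
  | nil => intro cur; simp [pvTok]
  | cons x t ih =>
    intro cur
    have hx : x = '_' := hv x (by simp)
    subst hx
    rw [pvTok_under]
    have ih' := ih (fun c hc => hv c (by simp [hc]))
    by_cases hcur : cur = []
    · simp [hcur, ih' []]
    · simp [hcur, ih' []]

lemma pvTok_append_underscores (m : List Char) (v : List Char) (hv : ∀ c ∈ v, c = '_') :
    ∀ cur : List Char, pvTok cur (m ++ v) = pvTok cur m := by
  induction m with
  | nil =>
    intro cur
    rw [List.nil_append, pvTok_all_underscore v hv cur]
    by_cases hcur : cur = [] <;> simp [pvTok, hcur]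
  | cons x t ih =>
    intro cur
    by_cases hx : x = '_'
    · subst hx
      rw [List.cons_append, pvTok_under, pvTok_under]
      by_cases hcur : cur = [] <;> simp [hcur, ih]
    · rw [List.cons_append, pvTok_other _ x _ hx, pvTok_other _ x _ hx]
      exact ih _

lemma pv_head_dropWhile {p : Char → Bool} (l : List Char) (a : Char)
    (h : (List.dropWhile p l).head? = some a) : p a = false := by
  induction l with
  | nil => simp at h
  | cons c t ih =>
    by_cases hc : p c = true
    · rw [List.dropWhile_cons_of_pos hc] at h; exact ih h
    · rw [List.dropWhile_cons_of_neg hc] at h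
      simp at h
      subst h
      simpa using hc

-- ---- the main per-string lemma ----
set_option maxHeartbeats 1000000 in
lemma pv_main (s : String) :
    normalize_metric_name_py (some s) = normalize_metric_name_py_alt (some s) := by
  have hsc : ∀ z : List Char, PySem.Chars.stripChars z ['_'] =
      (List.dropWhile (fun c : Char => c == '_')
        (List.dropWhile (fun c : Char => c == '_') z).reverse).reverse := by
    intro z
    have hq : (fun c => (['_'] : List Char).contains c) = (fun c : Char => c == '_') := by
      funext c; by_cases h : c = '_' <;> simp [h]
    simp only [PySem.Chars.stripChars, hq]
  simp only [normalize_metric_name_py, normalize_metric_name_py_alt]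
  have hB := pv_fold s.toList [] []
  simp only [List.nil_append] at hB
  set m := s.toList.map pvNormChar with hm
  obtain ⟨u, v, hdec, hu, hv⟩ := pv_decomp s.toList
  have hu' : ∀ c ∈ u.map pvNormChar, c = '_' := by
    intro c hc
    rcases List.mem_map.mp hc with ⟨d, hd, rfl⟩
    exact pv_normChar_underscore d (pv_space_not_alnum d (hu d hd))
  have hv' : ∀ c ∈ v.map pvNormChar, c = '_' := by
    intro c hc
    rcases List.mem_map.mp hc with ⟨d, hd, rfl⟩
    exact pv_normChar_underscore d (pv_space_not_alnum d (hv d hd))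
  have hmdec : m = u.map pvNormChar ++ (PySem.Chars.strip s.toList).map pvNormChar ++ v.map pvNormChar := by
    rw [hm]
    conv_lhs => rw [hdec]
    rw [List.map_append, List.map_append]
  set m1 := List.dropWhile (fun c : Char => c == '_') m with hm1
  set m2 := (List.dropWhile (fun c : Char => c == '_') m1.reverse).reverse with hm2
  have hn0 : PySem.Chars.stripChars ((PySem.Chars.strip s.toList).map pvNormChar) ['_'] = m2 := by
    rw [hsc, hm2, hm1, hmdec]
    exact (pv_strip_pad _ _ _ hu' hv').symm
  have hm12 : m1 = m2 ++ (List.takeWhile (fun c : Char => c == '_') m1.reverse).reverse := by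
    have h3 := congrArg List.reverse
      (List.takeWhile_append_dropWhile (p := fun c : Char => c == '_') (l := m1.reverse)).symm
    simp only [List.reverse_reverse, List.reverse_append] at h3
    rw [hm2]
    exact h3
  have hv2 : ∀ c ∈ (List.takeWhile (fun c : Char => c == '_') m1.reverse).reverse, c = '_' := by
    intro c hc
    have := List.mem_takeWhile_imp (List.mem_reverse.mp hc)
    simpa using this
  have htok : pvTok [] m = pvTok [] m2 := by
    rw [pvTok_dropWhile m, ← hm1, hm12, pvTok_append_underscores m2 _ hv2]
  have hlast2 : m2.getLast? ≠ some '_' := by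
    rw [hm2, List.getLast?_reverse]
    intro hcon
    have := pv_head_dropWhile m1.reverse '_' hcon
    simp at this
  have hM := pvM m2.length m2 [] le_rfl (by simp) hlast2
  rw [if_pos rfl] at hM
  have hdrop2 : List.dropWhile (fun c : Char => c == '_') m2 = m2 := by
    cases hc2 : m2 with
    | nil => simp
    | cons x r =>
      have hhead : (List.dropWhile (fun c : Char => c == '_') m).head? = some x := by
        rw [← hm1, hm12, hc2]
        simp
      have hx := pv_head_dropWhile m x hhead
      rw [List.dropWhile_cons_of_neg (by simp [hx])]
  rw [hdrop2] at hM
  rw [hn0, pvAWhile_eq m2.length m2 le_rfl, hB, htok, ← hM]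
  by_cases hT : pvTok [] m2 = []
  · rw [hT, PySem.Chars.join_nil]
    rfl
  · rw [if_neg hT]
    by_cases hj : PySem.Chars.join ['_'] (pvTok [] m2) = []
    · rw [if_pos hj, hj]
    · rw [if_neg hj]

-- ===== VERDICT (by name: the statement is the Claim_ definition above) =====
theorem normalize_metric_name_py_spec : Claim_equal_normalize_metric_name_py := by
  intro metric_name _ _
  unfold Spec_normalize_metric_name_py
  cases metric_name with
  | none => rfl
  | some s => exact pv_main s
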